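-- pv_equiv track=rewrite | github.com/X65060782/MSc-Individual-Project | is_brooks_graph.py | is_brooks_graph
-- ===== SOURCE A (Python) =====
-- from collections import deque
--
-- def is_brooks_graph(adj):
--     n = len(adj)
--
--     # 1. 判断连通性（BFS）
--     visited = [False] * n
--     def bfs(start):
--         queue = deque([start])
--         visited[start] = True
--         while queue:
--             v = queue.popleft()
--             for u in adj[v]:
--                 if not visited[u]:
--                     visited[u] = True
--                     queue.append(u)
--
--     bfs(0)
--     if not all(visited):
--         return False, "图不连通"
--
--     # 2. 判断是否是完全图（每个顶点度数为 n-1）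
--     if all(len(adj[v]) == n - 1 for v in range(n)):
--         return False, "图是完全图"
--
--     # 3. 判断是否是奇圈（即长度为奇数的简单环图）
--     if all(len(adj[v]) == 2 for v in range(n)):
--         # 每个点度数为2，可能是环图
--         # 用 BFS 检查是否有奇数个点 + 环
--         def is_cycle():
--             count = 0
--             v = 0
--             prev = -1
--             visited_cycle = set()
--             while v not in visited_cycle:
--                 visited_cycle.add(v)
--                 count += 1
--                 neighbors = [u for u in adj[v] if u != prev]
--                 if not neighbors:
--                     return False
--                 prev, v = v, neighbors[0]
--             return count == len(adj) and count % 2 == 1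
--
--         if is_cycle():
--             return False, "图是奇圈"
--
--     # 都通过则为 Brooks 图
--     return True, "图是 Brooks 图"
-- ===== SOURCE B (Python) =====
-- def is_brooks_graph(adj):
--     n = len(adj)
--     # connectivity by saturation: sweep the whole vertex range n times,
--     # propagating reachability from vertex 0 (no queue/frontier needed)
--     reached = [False] * n
--     reached[0] = True
--     for _ in range(n):
--         for v in range(n):
--             if reached[v]:
--                 for u in adj[v]:
--                     reached[u] = True
--     if not all(reached):
--         return False, "图不连通"
--     degs = [len(row) for row in adj]
--     if all(d == n - 1 for d in degs):
--         return False, "图是完全图"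
--     if all(d == 2 for d in degs):
--         seen = []
--         v, prev = 0, -1
--         ok = None
--         while v not in seen:
--             seen.append(v)
--             nxt = next((u for u in adj[v] if u != prev), None)
--             if nxt is None:
--                 ok = False
--                 break
--             prev, v = v, nxt
--         if ok is None:
--             ok = len(seen) == n and len(seen) % 2 == 1
--         if ok:
--             return False, "图是奇圈"
--     return True, "图是 Brooks 图"
-- ===== Notes on version B (the rewrite author's own statement) =====
-- stated objective: alternative
-- what changed: Connectivity is decided by a queue-free round-based saturation sweep (n passes propagating a boolean reachability vector) instead of A's frontier BFS with a deque; the two degree tests read a degree list computed once instead of re-indexing adj, and the odd-cycle walk records its visited labels in an ordered list instead of a set plus a separate counter.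
import Mathlib
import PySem

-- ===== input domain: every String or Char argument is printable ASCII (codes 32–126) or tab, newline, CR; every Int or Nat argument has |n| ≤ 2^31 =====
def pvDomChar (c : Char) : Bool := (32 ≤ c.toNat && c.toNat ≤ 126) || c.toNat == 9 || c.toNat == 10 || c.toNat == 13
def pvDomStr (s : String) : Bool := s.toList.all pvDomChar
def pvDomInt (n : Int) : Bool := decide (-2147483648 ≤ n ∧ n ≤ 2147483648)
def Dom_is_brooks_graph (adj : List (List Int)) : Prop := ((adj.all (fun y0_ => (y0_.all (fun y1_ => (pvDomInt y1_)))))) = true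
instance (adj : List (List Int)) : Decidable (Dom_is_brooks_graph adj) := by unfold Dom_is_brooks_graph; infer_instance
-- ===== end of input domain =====

-- B computes connectivity by a queue-free round-based saturation sweep instead of A's
-- frontier BFS, reads degrees off a list computed once, and tracks the odd-cycle walk's
-- visited labels as an ordered list instead of a set plus counter (objective: alternative).

-- ===== PORT A =====

-- Python list indexing l[u] for -len(l) ≤ u < len(l): a negative u counts from the end;
-- pvNormIdx is exact on that range (an out-of-range u would be an IndexError, excluded by Pre_).
def pvNormIdx (n : Nat) (u : Int) : Nat := (if u < 0 then u + n else u).toNat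

-- one neighbour u of the popped vertex: `if not visited[u]: visited[u] = True; queue.append(u)`
def pvBfsStep (adj : List (List Int)) (st : List Bool × List Int) (u : Int) : List Bool × List Int :=
  if st.1.getD (pvNormIdx adj.length u) false then st
  else (st.1.set (pvNormIdx adj.length u) true, st.2 ++ [u])

-- `while queue: v = queue.popleft(); for u in adj[v]: …` — fuel 2n+1 always suffices inside
-- Pre_ (each iteration either stops at an empty queue or was paid for by a fresh visited mark)
def pvBfsLoop (adj : List (List Int)) : Nat → List Int → List Bool → List Bool
  | 0, _, visited => visited
  | _ + 1, [], visited => visited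
  | fuel + 1, v :: rest, visited =>
      let st := (adj.getD (pvNormIdx adj.length v) []).foldl (pvBfsStep adj) (visited, rest)
      pvBfsLoop adj fuel st.2 st.1

-- the `is_cycle` walk; `visited_cycle` is a Python set only ever extended with a fresh element
-- and probed for membership, kept as its insertion-order element list.  Fuel 2n+1 always
-- suffices inside Pre_: every iteration inserts a fresh int from [-n, n).
def pvCycleLoop (adj : List (List Int)) : Nat → Nat → Int → Int → List Int → Bool
  | 0, _, _, _, _ => false
  | fuel + 1, count, v, prev, s =>
      if s.contains v then count == adj.length && count % 2 == 1
      else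
        match (adj.getD (pvNormIdx adj.length v) []).filter (fun u => u != prev) with
        | [] => false
        | u :: _ => pvCycleLoop adj fuel (count + 1) u v (s ++ [v])

def is_brooks_graph (adj : List (List Int)) : Bool × String :=
  let n := adj.length
  let visited := pvBfsLoop adj (2 * n + 1) [0] ((List.replicate n false).set 0 true)
  if !(visited.all (fun b => b)) then (false, "图不连通")
  else if (List.range n).all (fun v => ((adj.getD v []).length : Int) == (n : Int) - 1) then
    (false, "图是完全图")
  else if ((List.range n).all (fun v => (adj.getD v []).length == 2)) &&
      pvCycleLoop adj (2 * n + 1) 0 0 (-1) [] then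
    (false, "图是奇圈")
  else (true, "图是 Brooks 图")

-- ===== PORT B =====
-- one saturation sweep: `for v in range(n): if reached[v]: for u in adj[v]: reached[u] = True`
def pvSweep (adj : List (List Int)) (r : List Bool) : List Bool :=
  (List.range adj.length).foldl
    (fun r v =>
      if r.getD v false then
        (adj.getD v []).foldl (fun r' u => r'.set (pvNormIdx adj.length u) true) r
      else r) r

-- the odd-cycle walk of Source B, tracking the visited labels as the ordered list `seen`
def pvWalkLoop (adj : List (List Int)) : Nat → List Int → Int → Int → Bool
  | 0, _, _, _ => false
  | fuel + 1, seen, v, prev =>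
      if seen.contains v then seen.length == adj.length && seen.length % 2 == 1
      else
        match (adj.getD (pvNormIdx adj.length v) []).find? (fun u => u != prev) with
        | none => false
        | some u => pvWalkLoop adj fuel (seen ++ [v]) u v

def is_brooks_graph_alt (adj : List (List Int)) : Bool × String :=
  let n := adj.length
  let reached := (pvSweep adj)^[n] ((List.replicate n false).set 0 true)
  if !(reached.all (fun b => b)) then (false, "图不连通")
  else
    let degs := adj.map List.length
    if degs.all (fun d => (d : Int) == (n : Int) - 1) then (false, "图是完全图")
    else if degs.all (fun d => d == 2) && pvWalkLoop adj (2 * n + 1) [] 0 (-1) then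
      (false, "图是奇圈")
    else (true, "图是 Brooks 图")

-- ===== PRECONDITION & SPEC =====
-- Pre_ excludes exactly the inputs on which A (and B) raise IndexError: the empty graph, and
-- graphs where some vertex reachable from 0 has a neighbour entry outside [-n, n).  Stated
-- declaratively: some vertex set S containing 0 has all its members' neighbour entries
-- in-range and (after Python's negative-index wrap) again inside S.
def Pre_is_brooks_graph (adj : List (List Int)) : Prop :=
  adj ≠ [] ∧ ∃ S ∈ (Finset.range adj.length).powerset, 0 ∈ S ∧
    ∀ v ∈ S, ∀ u ∈ adj.getD v [],
      -(adj.length : Int) ≤ u ∧ u < (adj.length : Int) ∧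
        ((if u < 0 then u + (adj.length : Int) else u).toNat ∈ S)
instance (adj : List (List Int)) : Decidable (Pre_is_brooks_graph adj) := by
  unfold Pre_is_brooks_graph; infer_instance

def pvWitness_is_brooks_graph : List (List Int) := [[1], [0]]

def Spec_is_brooks_graph (adj : List (List Int)) (out : Bool × String) : Prop := out = is_brooks_graph_alt adj
instance (adj : List (List Int)) (out : Bool × String) : Decidable (Spec_is_brooks_graph adj out) := by unfold Spec_is_brooks_graph; infer_instance

-- ===== CLAIM (what is proved, stated in full; the proofs are below) =====
def Claim_equal_is_brooks_graph : Prop := ∀ (adj : List (List Int)), Dom_is_brooks_graph adj → Pre_is_brooks_graph adj → Spec_is_brooks_graph adj (is_brooks_graph adj)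

-- ===== LEMMAS AND PROOFS =====

-- Bool-list toolbox
theorem lb_getD_set (s : List Bool) (i j : Nat) (v : Bool) :
    (s.set i v).getD j false = if i = j ∧ i < s.length then v else s.getD j false := by
  induction s generalizing i j with
  | nil => simp
  | cons a t ih =>
    cases i with
    | zero => cases j <;> simp
    | succ i =>
      cases j with
      | zero => simp
      | succ j =>
        simp only [List.set_cons_succ, List.getD_cons_succ, List.length_cons, ih]
        by_cases h : i = j <;> simp [h]

theorem lb_getD_lt (s : List Bool) (i : Nat) (h : i < s.length) : s.getD i false = s[i] := by
  rw [List.getD_eq_getElem?_getD, List.getElem?_eq_getElem h]; rfl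

theorem lb_count_set (s : List Bool) (i : Nat) (h : i < s.length) (hf : s.getD i false = false) :
    (s.set i true).count true = s.count true + 1 := by
  induction s generalizing i with
  | nil => simp at h
  | cons a t ih =>
    cases i with
    | zero =>
      simp only [List.getD_cons_zero] at hf
      simp [hf]
    | succ i =>
      simp only [List.getD_cons_succ] at hf
      simp only [List.length_cons, Nat.add_lt_add_iff_right] at h
      simp [List.count_cons, ih i h hf]
      cases a <;> simp

theorem lb_count_le_mono (r s : List Bool) (hl : r.length = s.length)
    (hm : ∀ i, r.getD i false = true → s.getD i false = true) :
    r.count true ≤ s.count true := by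
  induction r generalizing s with
  | nil => simp
  | cons a t ih =>
    cases s with
    | nil => simp at hl
    | cons b u =>
      have hm0 := hm 0
      have hmt : ∀ i, t.getD i false = true → u.getD i false = true := fun i h => hm (i + 1) h
      have := ih u (by simpa using hl) hmt
      simp only [List.getD_cons_zero] at hm0
      simp only [List.count_cons]
      cases a
      · cases b <;> simp <;> omega
      · rw [hm0 rfl]; simp; omega

theorem lb_count_lt (r s : List Bool) (hl : r.length = s.length)
    (hm : ∀ i, r.getD i false = true → s.getD i false = true) (hne : r ≠ s) :
    r.count true < s.count true := by
  induction r generalizing s with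
  | nil => cases s with
    | nil => exact absurd rfl hne
    | cons b u => simp at hl
  | cons a t ih =>
    cases s with
    | nil => simp at hl
    | cons b u =>
      have hm0 := hm 0
      have hmt : ∀ i, t.getD i false = true → u.getD i false = true := fun i h => hm (i + 1) h
      have hlt : t.length = u.length := by simpa using hl
      simp only [List.getD_cons_zero] at hm0
      by_cases hab : a = b
      · have htu : t ≠ u := fun h => hne (by rw [hab, h])
        have := ih u hlt hmt htu
        simp only [List.count_cons, hab]
        omega
      · have ha : a = false := by
          cases a
          · rfl
          · exact absurd (hm0 rfl).symm hab
        have hb : b = true := by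
          cases b
          · rw [ha] at hab; exact absurd rfl hab
          · rfl
        have := lb_count_le_mono t u hlt hmt
        simp [ha, hb]
        omega

theorem lb_count_le (s : List Bool) : s.count true ≤ s.length := List.count_le_length

theorem lb_getD_replicate (n i : Nat) : (List.replicate n false).getD i false = false := by
  rw [List.getD_eq_getElem?_getD, List.getElem?_replicate]
  split <;> rfl

-- the shared initial vector: only index 0 (if it exists) is marked
theorem lb_r0_getD (n i : Nat) :
    ((List.replicate n false).set 0 true).getD i false = if 0 = i ∧ 0 < n then true else false := by
  rw [lb_getD_set, lb_getD_replicate]; simp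

theorem lb_r0_count (n : Nat) (hn : 0 < n) :
    ((List.replicate n false).set 0 true).count true = 1 := by
  rw [lb_count_set _ 0 (by simpa using hn) (lb_getD_replicate n 0)]
  simp [List.count_replicate]

theorem lb_r0_len (n : Nat) : ((List.replicate n false).set 0 true).length = n := by simp

-- the wrapped neighbour lists, and reachability from vertex 0 along them
def pvNbrs (adj : List (List Int)) (v : Nat) : List Nat :=
  (adj.getD v []).map (pvNormIdx adj.length)

inductive pvReach (adj : List (List Int)) : Nat → Prop
  | zero : pvReach adj 0
  | step {v w : Nat} : pvReach adj v → w ∈ pvNbrs adj v → pvReach adj w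

-- every reachable vertex is a valid index and all its neighbour entries are in range
def pvOK (adj : List (List Int)) : Prop :=
  ∀ i, pvReach adj i → i < adj.length ∧
    ∀ u ∈ adj.getD i [], -(adj.length : Int) ≤ u ∧ u < (adj.length : Int)

theorem pvNormIdx_lt (n : Nat) (u : Int) (h1 : -(n : Int) ≤ u) (h2 : u < (n : Int)) :
    pvNormIdx n u < n := by
  unfold pvNormIdx; split <;> omega

theorem pre_ok (adj : List (List Int)) (hp : Pre_is_brooks_graph adj) : pvOK adj := by
  obtain ⟨hne, S, hS, h0, hrow⟩ := hp
  have hsub : ∀ i ∈ S, i < adj.length := by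
    intro i hi
    have := Finset.mem_powerset.mp hS hi
    simpa using this
  have hreach : ∀ i, pvReach adj i → i ∈ S := by
    intro i hi
    induction hi with
    | zero => exact h0
    | step hv hw ih =>
      obtain ⟨u, hu, he⟩ := List.mem_map.mp hw
      rw [← he]
      simpa [pvNormIdx] using (hrow _ ih u hu).2.2
  intro i hi
  have hiS := hreach i hi
  exact ⟨hsub i hiS, fun u hu => ⟨(hrow i hiS u hu).1, (hrow i hiS u hu).2.1⟩⟩

-- ===== BFS side =====

theorem bfs_fold_basic (adj : List (List Int)) (L : List Int) :
    ∀ (vis : List Bool) (rest : List Int),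
    ∃ ext : List Int,
      (L.foldl (pvBfsStep adj) (vis, rest)).2 = rest ++ ext ∧
      (∀ u ∈ ext, u ∈ L) ∧
      (L.foldl (pvBfsStep adj) (vis, rest)).1.length = vis.length ∧
      (∀ i, vis.getD i false = true → (L.foldl (pvBfsStep adj) (vis, rest)).1.getD i false = true) ∧
      (∀ i, (L.foldl (pvBfsStep adj) (vis, rest)).1.getD i false = true →
        vis.getD i false = true ∨ ∃ u ∈ ext, pvNormIdx adj.length u = i) := by
  induction L with
  | nil =>
    intro vis rest
    exact ⟨[], by simp, by simp, rfl, fun i h => h, fun i h => Or.inl h⟩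
  | cons a t ih =>
    intro vis rest
    rw [List.foldl_cons]
    by_cases hv : vis.getD (pvNormIdx adj.length a) false = true
    · have hstep : pvBfsStep adj (vis, rest) a = (vis, rest) := by
        simp only [pvBfsStep]; rw [hv]; simp
      rw [hstep]
      obtain ⟨ext, h1, h2, h3, h4, h5⟩ := ih vis rest
      exact ⟨ext, h1, fun u hu => List.mem_cons_of_mem _ (h2 u hu), h3, h4,
        fun i hi => (h5 i hi).imp id (fun ⟨u, hu, he⟩ => ⟨u, hu, he⟩)⟩
    · have hvf : vis.getD (pvNormIdx adj.length a) false = false := by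
        simpa using hv
      have hstep : pvBfsStep adj (vis, rest) a
          = (vis.set (pvNormIdx adj.length a) true, rest ++ [a]) := by
        simp only [pvBfsStep]; rw [hvf]; simp
      rw [hstep]
      obtain ⟨ext, h1, h2, h3, h4, h5⟩ := ih (vis.set (pvNormIdx adj.length a) true) (rest ++ [a])
      refine ⟨a :: ext, ?_, ?_, ?_, ?_, ?_⟩
      · rw [h1]; simp
      · intro u hu
        rcases List.mem_cons.mp hu with h | h
        · exact h ▸ List.mem_cons_self
        · exact List.mem_cons_of_mem _ (h2 u h)
      · rw [h3]; simp
      · intro i hi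
        apply h4
        rw [lb_getD_set]
        split
        · rfl
        · exact hi
      · intro i hi
        rcases h5 i hi with h | ⟨u, hu, he⟩
        · rw [lb_getD_set] at h
          by_cases hc : pvNormIdx adj.length a = i ∧ pvNormIdx adj.length a < vis.length
          · exact Or.inr ⟨a, List.mem_cons_self, hc.1⟩
          · rw [if_neg hc] at h; exact Or.inl h
        · exact Or.inr ⟨u, List.mem_cons_of_mem _ hu, he⟩

theorem bfs_fold_cnt (adj : List (List Int)) (L : List Int) :
    ∀ (vis : List Bool) (rest : List Int),
    (∀ u ∈ L, pvNormIdx adj.length u < vis.length) →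
    (∀ u ∈ L, (L.foldl (pvBfsStep adj) (vis, rest)).1.getD (pvNormIdx adj.length u) false = true) ∧
    (L.foldl (pvBfsStep adj) (vis, rest)).1.count true + rest.length
      = vis.count true + (L.foldl (pvBfsStep adj) (vis, rest)).2.length := by
  induction L with
  | nil => intro vis rest _; exact ⟨fun u hu => absurd hu (List.not_mem_nil), by simp⟩
  | cons a t ih =>
    intro vis rest hL
    rw [List.foldl_cons]
    by_cases hv : vis.getD (pvNormIdx adj.length a) false = true
    · have hstep : pvBfsStep adj (vis, rest) a = (vis, rest) := by
        simp only [pvBfsStep]; rw [hv]; simp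
      rw [hstep]
      obtain ⟨hm, hc⟩ := ih vis rest (fun u hu => hL u (List.mem_cons_of_mem _ hu))
      refine ⟨?_, hc⟩
      intro u hu
      rcases List.mem_cons.mp hu with h | h
      · subst h
        obtain ⟨_, _, _, _, h4, _⟩ := bfs_fold_basic adj t vis rest
        exact h4 _ hv
      · exact hm u h
    · have hvf : vis.getD (pvNormIdx adj.length a) false = false := by
        simpa using hv
      have hstep : pvBfsStep adj (vis, rest) a
          = (vis.set (pvNormIdx adj.length a) true, rest ++ [a]) := by
        simp only [pvBfsStep]; rw [hvf]; simp
      rw [hstep]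
      have hlen : (vis.set (pvNormIdx adj.length a) true).length = vis.length := by simp
      obtain ⟨hm, hc⟩ := ih (vis.set (pvNormIdx adj.length a) true) (rest ++ [a])
        (fun u hu => by rw [hlen]; exact hL u (List.mem_cons_of_mem _ hu))
      refine ⟨?_, ?_⟩
      · intro u hu
        rcases List.mem_cons.mp hu with h | h
        · subst h
          obtain ⟨_, _, _, _, h4, _⟩ := bfs_fold_basic adj t (vis.set (pvNormIdx adj.length u) true) (rest ++ [u])
          apply h4
          rw [lb_getD_set]
          rw [if_pos ⟨rfl, hL u List.mem_cons_self⟩]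
        · exact hm u h
      · rw [lb_count_set vis _ (hL a List.mem_cons_self) hvf] at hc
        simp only [List.length_append, List.length_cons, List.length_nil] at hc ⊢
        omega

theorem bfs_len (adj : List (List Int)) (fuel : Nat) :
    ∀ (queue : List Int) (visited : List Bool),
    (pvBfsLoop adj fuel queue visited).length = visited.length := by
  induction fuel with
  | zero => intro q v; rfl
  | succ f ih =>
    intro q vis
    cases q with
    | nil => rfl
    | cons a rest =>
      show (pvBfsLoop adj f _ _).length = _
      rw [ih]
      obtain ⟨_, _, _, h3, _, _⟩ := bfs_fold_basic adj (adj.getD (pvNormIdx adj.length a) []) vis rest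
      exact h3

theorem bfs_sound (adj : List (List Int)) (fuel : Nat) :
    ∀ (queue : List Int) (visited : List Bool),
    (∀ u ∈ queue, pvReach adj (pvNormIdx adj.length u)) →
    (∀ i, visited.getD i false = true → pvReach adj i) →
    ∀ i, (pvBfsLoop adj fuel queue visited).getD i false = true → pvReach adj i := by
  induction fuel with
  | zero => intro q vis _ hv i h; exact hv i h
  | succ f ih =>
    intro q vis hq hv i
    cases q with
    | nil => exact hv i
    | cons a rest =>
      show (pvBfsLoop adj f _ _).getD i false = true → _
      obtain ⟨ext, h1, h2, _, _, h5⟩ := bfs_fold_basic adj (adj.getD (pvNormIdx adj.length a) []) vis rest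
      have hra : pvReach adj (pvNormIdx adj.length a) := hq a List.mem_cons_self
      have hext : ∀ u ∈ ext, pvReach adj (pvNormIdx adj.length u) := by
        intro u hu
        exact pvReach.step hra (List.mem_map.mpr ⟨u, h2 u hu, rfl⟩)
      apply ih
      · intro u hu
        rw [h1] at hu
        rcases List.mem_append.mp hu with h | h
        · exact hq u (List.mem_cons_of_mem _ h)
        · exact hext u h
      · intro j hj
        rcases h5 j hj with h | ⟨u, hu, he⟩
        · exact hv j h
        · rw [← he]; exact hext u hu

theorem bfs_complete (adj : List (List Int)) (hok : pvOK adj) (fuel : Nat) :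
    ∀ (queue : List Int) (visited : List Bool),
    visited.length = adj.length →
    (∀ u ∈ queue, visited.getD (pvNormIdx adj.length u) false = true) →
    (∀ i, visited.getD i false = true → pvReach adj i) →
    (∀ i, visited.getD i false = true →
      (∀ w ∈ pvNbrs adj i, visited.getD w false = true) ∨ ∃ u ∈ queue, pvNormIdx adj.length u = i) →
    2 * (adj.length - visited.count true) + queue.length ≤ fuel →
    (∀ i, visited.getD i false = true → (pvBfsLoop adj fuel queue visited).getD i false = true) ∧
    (∀ i, (pvBfsLoop adj fuel queue visited).getD i false = true →
       ∀ w ∈ pvNbrs adj i, (pvBfsLoop adj fuel queue visited).getD w false = true) := by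
  induction fuel with
  | zero =>
    intro q vis hlen hq hv hpend hfuel
    have hq0 : q = [] := List.length_eq_zero_iff.mp (by omega)
    subst hq0
    refine ⟨fun i h => h, fun i hi w hw => ?_⟩
    rcases hpend i hi with h | ⟨u, hu, _⟩
    · exact h w hw
    · exact absurd hu (List.not_mem_nil)
  | succ f ih =>
    intro q vis hlen hq hv hpend hfuel
    cases q with
    | nil =>
      refine ⟨fun i h => h, fun i hi w hw => ?_⟩
      rcases hpend i hi with h | ⟨u, hu, _⟩
      · exact h w hw
      · exact absurd hu (List.not_mem_nil)
    | cons a rest =>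
      have hva : vis.getD (pvNormIdx adj.length a) false = true := hq a List.mem_cons_self
      have hra : pvReach adj (pvNormIdx adj.length a) := hv _ hva
      have hrow : ∀ u ∈ adj.getD (pvNormIdx adj.length a) [], pvNormIdx adj.length u < vis.length := by
        intro u hu
        have := (hok _ hra).2 u hu
        rw [hlen]
        exact pvNormIdx_lt _ _ this.1 this.2
      obtain ⟨ext, h1, h2, h3, h4, h5⟩ := bfs_fold_basic adj (adj.getD (pvNormIdx adj.length a) []) vis rest
      obtain ⟨hmarks, hcnt⟩ := bfs_fold_cnt adj (adj.getD (pvNormIdx adj.length a) []) vis rest hrow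
      set st := (adj.getD (pvNormIdx adj.length a) []).foldl (pvBfsStep adj) (vis, rest) with hst
      have hext : ∀ u ∈ ext, pvReach adj (pvNormIdx adj.length u) := by
        intro u hu
        exact pvReach.step hra (List.mem_map.mpr ⟨u, h2 u hu, rfl⟩)
      have hv' : ∀ i, st.1.getD i false = true → pvReach adj i := by
        intro i hi
        rcases h5 i hi with h | ⟨u, hu, he⟩
        · exact hv i h
        · rw [← he]; exact hext u hu
      have hq' : ∀ u ∈ st.2, st.1.getD (pvNormIdx adj.length u) false = true := by
        intro u hu
        rw [h1] at hu
        rcases List.mem_append.mp hu with h | h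
        · exact h4 _ (hq u (List.mem_cons_of_mem _ h))
        · exact hmarks u (h2 u h)
      have hpend' : ∀ i, st.1.getD i false = true →
          (∀ w ∈ pvNbrs adj i, st.1.getD w false = true) ∨ ∃ u ∈ st.2, pvNormIdx adj.length u = i := by
        intro i hi
        by_cases hvi : vis.getD i false = true
        · rcases hpend i hvi with h | ⟨u, hu, he⟩
          · exact Or.inl (fun w hw => h4 w (h w hw))
          · rcases List.mem_cons.mp hu with h | h
            · subst h
              refine Or.inl ?_
              intro w hw
              rw [← he] at hw
              obtain ⟨u', hu', he'⟩ := List.mem_map.mp hw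
              rw [← he']
              exact hmarks u' hu'
            · exact Or.inr ⟨u, by rw [h1]; exact List.mem_append_left _ h, he⟩
        · rcases h5 i hi with h | ⟨u, hu, he⟩
          · exact absurd h hvi
          · exact Or.inr ⟨u, by rw [h1]; exact List.mem_append_right _ hu, he⟩
      have hfuel' : 2 * (adj.length - st.1.count true) + st.2.length ≤ f := by
        have hc1 : st.1.count true ≤ adj.length := by
          have := lb_count_le st.1
          omega
        have hc2 : vis.count true ≤ st.1.count true :=
          lb_count_le_mono vis st.1 h3.symm h4
        have hq1 : st.2.length = rest.length + ext.length := by rw [h1]; simp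
        simp only [List.length_cons] at hfuel
        omega
      have hmain := ih st.2 st.1 (by rw [h3, hlen]) hq' hv' hpend' hfuel'
      have hred : pvBfsLoop adj (f + 1) (a :: rest) vis = pvBfsLoop adj f st.2 st.1 := rfl
      rw [hred]
      exact ⟨fun i hi => hmain.1 i (h4 i hi), hmain.2⟩

-- the BFS visited vector decides exactly reachability
theorem bfs_iff (adj : List (List Int)) (hok : pvOK adj) (hn : 0 < adj.length) :
    ∀ i, (pvBfsLoop adj (2 * adj.length + 1) [0] ((List.replicate adj.length false).set 0 true)).getD i false = true
      ↔ pvReach adj i := by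
  set n := adj.length with hnn
  set vis0 := (List.replicate n false).set 0 true with hv0
  have hlen0 : vis0.length = n := lb_r0_len n
  have hget0 : ∀ i, vis0.getD i false = true ↔ i = 0 := by
    intro i
    rw [hv0, lb_r0_getD]
    constructor
    · intro h
      by_cases hc : 0 = i ∧ 0 < n
      · omega
      · rw [if_neg hc] at h; exact absurd h (by simp)
    · intro h; subst h; rw [if_pos ⟨rfl, hn⟩]
  have hv : ∀ i, vis0.getD i false = true → pvReach adj i := by
    intro i h; rw [(hget0 i).mp h]; exact pvReach.zero
  have hq : ∀ u ∈ ([0] : List Int), vis0.getD (pvNormIdx n u) false = true := by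
    intro u hu
    rw [List.mem_singleton] at hu
    subst hu
    exact (hget0 _).mpr (by simp [pvNormIdx])
  have hqr : ∀ u ∈ ([0] : List Int), pvReach adj (pvNormIdx n u) := by
    intro u hu
    rw [List.mem_singleton] at hu
    subst hu
    have : pvNormIdx n 0 = 0 := by simp [pvNormIdx]
    rw [this]; exact pvReach.zero
  have hpend : ∀ i, vis0.getD i false = true →
      (∀ w ∈ pvNbrs adj i, vis0.getD w false = true) ∨ ∃ u ∈ ([0] : List Int), pvNormIdx n u = i := by
    intro i h
    refine Or.inr ⟨0, List.mem_singleton.mpr rfl, ?_⟩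
    rw [(hget0 i).mp h]
    simp [pvNormIdx]
  have hcnt : vis0.count true = 1 := lb_r0_count n hn
  have hfuel : 2 * (n - vis0.count true) + ([0] : List Int).length ≤ 2 * n + 1 := by
    rw [hcnt]; simp only [List.length_cons, List.length_nil]; omega
  obtain ⟨hmono, hclosed⟩ := bfs_complete adj hok (2 * n + 1) [0] vis0 hlen0 hq hv hpend hfuel
  intro i
  constructor
  · exact bfs_sound adj (2 * n + 1) [0] vis0 hqr hv i
  · intro hr
    induction hr with
    | zero => exact hmono 0 ((hget0 0).mpr rfl)
    | step hv' hw ih => exact hclosed _ ih _ hw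

-- ===== sweep side =====

theorem infold_len (adj : List (List Int)) (L : List Int) :
    ∀ (r : List Bool), (L.foldl (fun r' u => r'.set (pvNormIdx adj.length u) true) r).length = r.length := by
  induction L with
  | nil => intro r; rfl
  | cons a t ih => intro r; rw [List.foldl_cons, ih]; simp

theorem infold_mono (adj : List (List Int)) (L : List Int) :
    ∀ (r : List Bool) (i : Nat), r.getD i false = true →
      (L.foldl (fun r' u => r'.set (pvNormIdx adj.length u) true) r).getD i false = true := by
  induction L with
  | nil => intro r i h; exact h
  | cons a t ih =>
    intro r i h
    rw [List.foldl_cons]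
    apply ih
    rw [lb_getD_set]
    split
    · rfl
    · exact h

theorem infold_marks (adj : List (List Int)) (L : List Int) :
    ∀ (r : List Bool), (∀ u ∈ L, pvNormIdx adj.length u < r.length) →
      ∀ u ∈ L, (L.foldl (fun r' u => r'.set (pvNormIdx adj.length u) true) r).getD (pvNormIdx adj.length u) false = true := by
  induction L with
  | nil => intro r _ u hu; exact absurd hu (List.not_mem_nil)
  | cons a t ih =>
    intro r hL u hu
    rw [List.foldl_cons]
    rcases List.mem_cons.mp hu with h | h
    · subst h
      apply infold_mono
      rw [lb_getD_set]
      rw [if_pos ⟨rfl, hL u List.mem_cons_self⟩]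
    · exact ih _ (fun w hw => by rw [List.length_set]; exact hL w (List.mem_cons_of_mem _ hw)) u h

theorem infold_sound (adj : List (List Int)) (L : List Int) :
    ∀ (r : List Bool) (i : Nat),
      (L.foldl (fun r' u => r'.set (pvNormIdx adj.length u) true) r).getD i false = true →
      r.getD i false = true ∨ ∃ u ∈ L, pvNormIdx adj.length u = i := by
  induction L with
  | nil => intro r i h; exact Or.inl h
  | cons a t ih =>
    intro r i h
    rw [List.foldl_cons] at h
    rcases ih _ i h with h' | ⟨u, hu, he⟩
    · rw [lb_getD_set] at h'
      by_cases hc : pvNormIdx adj.length a = i ∧ pvNormIdx adj.length a < r.length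
      · exact Or.inr ⟨a, List.mem_cons_self, hc.1⟩
      · rw [if_neg hc] at h'; exact Or.inl h'
    · exact Or.inr ⟨u, List.mem_cons_of_mem _ hu, he⟩

-- outer fold of one sweep, over an arbitrary vertex list
def pvOuter (adj : List (List Int)) (r : List Bool) (v : Nat) : List Bool :=
  if r.getD v false then
    (adj.getD v []).foldl (fun r' u => r'.set (pvNormIdx adj.length u) true) r
  else r

theorem sweep_eq_outer (adj : List (List Int)) (r : List Bool) :
    pvSweep adj r = (List.range adj.length).foldl (pvOuter adj) r := rfl

theorem outer_len (adj : List (List Int)) (r : List Bool) (v : Nat) :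
    (pvOuter adj r v).length = r.length := by
  unfold pvOuter; split
  · exact infold_len adj _ r
  · rfl

theorem outer_mono (adj : List (List Int)) (r : List Bool) (v : Nat) (i : Nat)
    (h : r.getD i false = true) : (pvOuter adj r v).getD i false = true := by
  unfold pvOuter; split
  · exact infold_mono adj _ r i h
  · exact h

theorem outfold_len (adj : List (List Int)) (L : List Nat) :
    ∀ (r : List Bool), (L.foldl (pvOuter adj) r).length = r.length := by
  induction L with
  | nil => intro r; rfl
  | cons a t ih => intro r; rw [List.foldl_cons, ih, outer_len]

theorem outfold_mono (adj : List (List Int)) (L : List Nat) :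
    ∀ (r : List Bool) (i : Nat), r.getD i false = true → (L.foldl (pvOuter adj) r).getD i false = true := by
  induction L with
  | nil => intro r i h; exact h
  | cons a t ih => intro r i h; rw [List.foldl_cons]; exact ih _ i (outer_mono adj r a i h)

theorem outfold_sound (adj : List (List Int)) (L : List Nat) :
    ∀ (r : List Bool), (∀ i, r.getD i false = true → pvReach adj i) →
      ∀ i, (L.foldl (pvOuter adj) r).getD i false = true → pvReach adj i := by
  induction L with
  | nil => intro r hr i h; exact hr i h
  | cons a t ih =>
    intro r hr i h
    rw [List.foldl_cons] at h
    apply ih _ _ i h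
    intro j hj
    unfold pvOuter at hj
    split at hj
    · rename_i hra
      rcases infold_sound adj _ r j hj with h' | ⟨u, hu, he⟩
      · exact hr j h'
      · rw [← he]
        exact pvReach.step (hr a hra) (List.mem_map.mpr ⟨u, hu, rfl⟩)
    · exact hr j hj

theorem outfold_marks (adj : List (List Int)) (L : List Nat) :
    ∀ (r : List Bool) (v : Nat), v ∈ L → r.getD v false = true →
      (∀ u ∈ adj.getD v [], pvNormIdx adj.length u < r.length) →
      ∀ w ∈ pvNbrs adj v, (L.foldl (pvOuter adj) r).getD w false = true := by
  induction L with
  | nil => intro r v hv; exact absurd hv (List.not_mem_nil)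
  | cons a t ih =>
    intro r v hv hrv hrow w hw
    rw [List.foldl_cons]
    rcases List.mem_cons.mp hv with h | h
    · subst h
      apply outfold_mono
      unfold pvOuter
      rw [if_pos hrv]
      obtain ⟨u, hu, he⟩ := List.mem_map.mp hw
      rw [← he]
      exact infold_marks adj _ r hrow u hu
    · exact ih (pvOuter adj r a) v h (outer_mono adj r a v hrv)
        (fun u hu => by rw [outer_len]; exact hrow u hu) w hw

-- a fixpoint of the sweep is closed under the neighbour relation (on sound vectors)
theorem sweep_closed_of_fix (adj : List (List Int)) (hok : pvOK adj) (r : List Bool)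
    (hlen : r.length = adj.length) (hs : ∀ i, r.getD i false = true → pvReach adj i)
    (hfix : pvSweep adj r = r) :
    ∀ v, r.getD v false = true → ∀ w ∈ pvNbrs adj v, r.getD w false = true := by
  intro v hv w hw
  have hrv : pvReach adj v := hs v hv
  have hvlt : v < adj.length := (hok v hrv).1
  have hrow : ∀ u ∈ adj.getD v [], pvNormIdx adj.length u < r.length := by
    intro u hu
    have := (hok v hrv).2 u hu
    rw [hlen]
    exact pvNormIdx_lt _ _ this.1 this.2
  have := outfold_marks adj (List.range adj.length) r v (List.mem_range.mpr hvlt) hv hrow w hw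
  rw [← sweep_eq_outer, hfix] at this
  exact this

theorem sweep_len (adj : List (List Int)) (r : List Bool) : (pvSweep adj r).length = r.length := by
  rw [sweep_eq_outer]; exact outfold_len adj _ r

theorem sweep_mono (adj : List (List Int)) (r : List Bool) (i : Nat)
    (h : r.getD i false = true) : (pvSweep adj r).getD i false = true := by
  rw [sweep_eq_outer]; exact outfold_mono adj _ r i h

theorem sweep_sound (adj : List (List Int)) (r : List Bool)
    (hr : ∀ i, r.getD i false = true → pvReach adj i) :
    ∀ i, (pvSweep adj r).getD i false = true → pvReach adj i := by
  rw [sweep_eq_outer]; exact outfold_sound adj _ r hr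

theorem it_len (adj : List (List Int)) (m : Nat) (r : List Bool) :
    ((pvSweep adj)^[m] r).length = r.length := by
  induction m with
  | zero => rfl
  | succ k ih => rw [Function.iterate_succ_apply', sweep_len, ih]

theorem it_mono (adj : List (List Int)) (m : Nat) (r : List Bool) (i : Nat)
    (h : r.getD i false = true) : ((pvSweep adj)^[m] r).getD i false = true := by
  induction m with
  | zero => exact h
  | succ k ih => rw [Function.iterate_succ_apply']; exact sweep_mono adj _ i ih

theorem it_sound (adj : List (List Int)) (m : Nat) (r : List Bool)
    (hr : ∀ i, r.getD i false = true → pvReach adj i) :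
    ∀ i, ((pvSweep adj)^[m] r).getD i false = true → pvReach adj i := by
  induction m with
  | zero => exact hr
  | succ k ih =>
    intro i h
    rw [Function.iterate_succ_apply'] at h
    exact sweep_sound adj _ ih i h

theorem it_stable (adj : List (List Int)) (r : List Bool) (k : Nat)
    (h : (pvSweep adj)^[k + 1] r = (pvSweep adj)^[k] r) :
    ∀ m, k ≤ m → (pvSweep adj)^[m] r = (pvSweep adj)^[k] r := by
  intro m hm
  induction m with
  | zero => cases Nat.le_zero.mp hm; rfl
  | succ j ih =>
    rcases Nat.eq_or_lt_of_le hm with he | hlt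
    · rw [← he]
    · have hkj : k ≤ j := by omega
      calc (pvSweep adj)^[j + 1] r = pvSweep adj ((pvSweep adj)^[j] r) :=
            Function.iterate_succ_apply' (pvSweep adj) j r
        _ = pvSweep adj ((pvSweep adj)^[k] r) := by rw [ih hkj]
        _ = (pvSweep adj)^[k + 1] r := (Function.iterate_succ_apply' (pvSweep adj) k r).symm
        _ = (pvSweep adj)^[k] r := h

-- after n sweeps the vector is a fixpoint
theorem it_fix (adj : List (List Int)) (hn : 0 < adj.length) :
    pvSweep adj ((pvSweep adj)^[adj.length] ((List.replicate adj.length false).set 0 true))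
      = (pvSweep adj)^[adj.length] ((List.replicate adj.length false).set 0 true) := by
  set n := adj.length with hnn
  set r0 := (List.replicate n false).set 0 true with hr0
  by_cases hfix : ∃ k < n, (pvSweep adj)^[k + 1] r0 = (pvSweep adj)^[k] r0
  · obtain ⟨k, hk, hfk⟩ := hfix
    have h1 := it_stable adj r0 k hfk n (by omega)
    calc pvSweep adj ((pvSweep adj)^[n] r0) = pvSweep adj ((pvSweep adj)^[k] r0) := by rw [h1]
      _ = (pvSweep adj)^[k + 1] r0 := (Function.iterate_succ_apply' (pvSweep adj) k r0).symm
      _ = (pvSweep adj)^[k] r0 := hfk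
      _ = (pvSweep adj)^[n] r0 := h1.symm
  · exfalso
    have hfix' : ∀ k, k < n → (pvSweep adj)^[k + 1] r0 ≠ (pvSweep adj)^[k] r0 :=
      fun k hk he => hfix ⟨k, hk, he⟩
    have hgrow : ∀ k, k < n → ((pvSweep adj)^[k] r0).count true + 1 ≤ ((pvSweep adj)^[k + 1] r0).count true := by
      intro k hk
      have hne := hfix' k hk
      have hlen : ((pvSweep adj)^[k] r0).length = ((pvSweep adj)^[k + 1] r0).length := by
        rw [it_len, it_len]
      have hm : ∀ i, ((pvSweep adj)^[k] r0).getD i false = true →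
          ((pvSweep adj)^[k + 1] r0).getD i false = true := by
        intro i h
        rw [Function.iterate_succ_apply']
        exact sweep_mono adj _ i h
      have := lb_count_lt _ _ hlen hm (fun h => hne h.symm)
      omega
    have hchain : ∀ k, k ≤ n → k + 1 ≤ ((pvSweep adj)^[k] r0).count true := by
      intro k
      induction k with
      | zero => intro _; rw [Function.iterate_zero_apply, lb_r0_count n hn]
      | succ j ih =>
        intro hj
        have h1 := ih (by omega)
        have h2 := hgrow j (by omega)
        omega
    have h1 := hchain n (le_refl n)
    have h2 : ((pvSweep adj)^[n] r0).count true ≤ n := by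
      have := lb_count_le ((pvSweep adj)^[n] r0)
      rw [it_len, lb_r0_len] at this
      exact this
    omega

theorem sweep_iff (adj : List (List Int)) (hok : pvOK adj) (hn : 0 < adj.length) :
    ∀ i, ((pvSweep adj)^[adj.length] ((List.replicate adj.length false).set 0 true)).getD i false = true
      ↔ pvReach adj i := by
  set n := adj.length with hnn
  set r0 := (List.replicate n false).set 0 true with hr0
  have hs : ∀ i, r0.getD i false = true → pvReach adj i := by
    intro i h
    rw [hr0, lb_r0_getD] at h
    by_cases hc : 0 = i ∧ 0 < n
    · rw [← hc.1]; exact pvReach.zero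
    · rw [if_neg hc] at h; exact absurd h (by simp)
  intro i
  constructor
  · exact it_sound adj n r0 hs i
  · intro hr
    induction hr with
    | zero =>
      apply it_mono
      rw [hr0, lb_r0_getD, if_pos ⟨rfl, hn⟩]
    | step hv hw ih =>
      exact sweep_closed_of_fix adj hok _ (by rw [it_len, lb_r0_len])
        (it_sound adj n r0 hs) (it_fix adj hn) _ ih _ hw

-- the two reachability vectors are EQUAL as lists
theorem vectors_eq (adj : List (List Int)) (hok : pvOK adj) (hn : 0 < adj.length) :
    pvBfsLoop adj (2 * adj.length + 1) [0] ((List.replicate adj.length false).set 0 true)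
      = (pvSweep adj)^[adj.length] ((List.replicate adj.length false).set 0 true) := by
  set A := pvBfsLoop adj (2 * adj.length + 1) [0] ((List.replicate adj.length false).set 0 true) with hA
  set B := (pvSweep adj)^[adj.length] ((List.replicate adj.length false).set 0 true) with hB
  have hla : A.length = adj.length := by rw [hA, bfs_len, lb_r0_len]
  have hlb : B.length = adj.length := by rw [hB, it_len, lb_r0_len]
  apply List.ext_getElem (by rw [hla, hlb])
  intro i h1 h2
  have hia := bfs_iff adj hok hn i
  have hib := sweep_iff adj hok hn i
  rw [← hA] at hia
  rw [← hB] at hib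
  rw [lb_getD_lt A i h1] at hia
  rw [lb_getD_lt B i h2] at hib
  by_cases hr : pvReach adj i
  · rw [hia.mpr hr, hib.mpr hr]
  · have ha : A[i] ≠ true := fun h => hr (hia.mp h)
    have hb : B[i] ≠ true := fun h => hr (hib.mp h)
    rw [Bool.eq_false_iff.mpr ha, Bool.eq_false_iff.mpr hb]

-- degree tests: range-indexed form (A) equals map-over-rows form (B)
theorem degs_eq (adj : List (List Int)) (p : Nat → Bool) :
    (List.range adj.length).all (fun v => p (adj.getD v []).length)
      = (adj.map List.length).all p := by
  rcases hb : (adj.map List.length).all p with _ | _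
  · rw [List.all_eq_false] at hb
    obtain ⟨d, hd, hpd⟩ := hb
    obtain ⟨row, hrow, he⟩ := List.mem_map.mp hd
    obtain ⟨i, hi, hrei⟩ := List.mem_iff_getElem.mp hrow
    rw [List.all_eq_false]
    refine ⟨i, List.mem_range.mpr hi, ?_⟩
    rw [List.getD_eq_getElem?_getD, List.getElem?_eq_getElem hi]
    simpa [hrei, he] using hpd
  · rw [List.all_eq_true] at hb ⊢
    intro v hv
    have hvlt := List.mem_range.mp hv
    rw [List.getD_eq_getElem?_getD, List.getElem?_eq_getElem hvlt]
    exact hb _ (List.mem_map.mpr ⟨adj[v], List.getElem_mem hvlt, rfl⟩)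

-- find? is the head of filter
theorem find?_eq_head_filter (p : Int → Bool) (l : List Int) :
    l.find? p = (l.filter p).head? := by
  induction l with
  | nil => rfl
  | cons a t ih =>
    by_cases h : p a
    · rw [List.find?_cons_of_pos h, List.filter_cons_of_pos h]; rfl
    · rw [List.find?_cons_of_neg (by simpa using h), List.filter_cons_of_neg (by simpa using h)]
      exact ih

-- A's counted-set walk equals B's list walk
theorem walk_eq (adj : List (List Int)) (fuel : Nat) :
    ∀ (s : List Int) (v prev : Int),
      pvCycleLoop adj fuel s.length v prev s = pvWalkLoop adj fuel s v prev := by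
  induction fuel with
  | zero => intro s v prev; rfl
  | succ f ih =>
    intro s v prev
    show pvCycleLoop adj (f + 1) s.length v prev s = pvWalkLoop adj (f + 1) s v prev
    rw [pvCycleLoop, pvWalkLoop]
    by_cases hc : s.contains v
    · rw [if_pos hc, if_pos hc]
    · rw [if_neg hc, if_neg hc]
      rw [find?_eq_head_filter]
      cases hf : (adj.getD (pvNormIdx adj.length v) []).filter (fun u => u != prev) with
      | nil => rfl
      | cons u rest =>
        show pvCycleLoop adj f (s.length + 1) u v (s ++ [v]) = pvWalkLoop adj f (s ++ [v]) u v
        have : s.length + 1 = (s ++ [v]).length := by simp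
        rw [this]
        exact ih (s ++ [v]) u v

-- ===== VERDICT (by name: the statement is the Claim_ definition above) =====
theorem is_brooks_graph_spec : Claim_equal_is_brooks_graph := by
  intro adj _ hpre
  unfold Spec_is_brooks_graph
  have hok : pvOK adj := pre_ok adj hpre
  have hn : 0 < adj.length := by
    cases adj with
    | nil => exact absurd rfl hpre.1
    | cons a t => simp
  have hvec := vectors_eq adj hok hn
  have hdeg1 := degs_eq adj (fun d => (d : Int) == (adj.length : Int) - 1)
  have hdeg2 := degs_eq adj (fun d => d == 2)
  have hwalk : pvCycleLoop adj (2 * adj.length + 1) 0 0 (-1) []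
      = pvWalkLoop adj (2 * adj.length + 1) [] 0 (-1) := by
    have := walk_eq adj (2 * adj.length + 1) [] 0 (-1)
    simpa using this
  simp only [is_brooks_graph, is_brooks_graph_alt, hvec, hdeg1, hdeg2, hwalk, List.all_map]
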